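-- pv_equiv track=rewrite | github.com/josue130/ExamenesCorregidos | ExamenIIICorregido.py | construir_digitos_aux
-- ===== SOURCE A (Python) =====
-- def largo1(matriz):
--      cont=0
--      for i in matriz:
--           cont+=1
--      return cont
--
-- def construir_digitos_aux(matriz):
--      res=[]
--      for i in matriz:
--           temp=0
--           cont=0
--           for j in range(1,largo1(i)+1):
--                if (i[-j]%2==0):
--                     temp+=i[-j]*10**cont
--                     cont+=1
--           res+=[temp]
--      return res
-- ===== SOURCE B (Python) =====
-- def construir_digitos_aux(matriz):
--     def fila_val(fila):
--         temp = 0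
--         for x in fila:
--             if x % 2 == 0:
--                 temp = temp * 10 + x
--         return temp
--     return [fila_val(fila) for fila in matriz]
-- ===== Notes on version B (the rewrite author's own statement) =====
-- stated objective: simpler
-- what changed: Replaces A's reverse negative indexing (i[-j]) with explicit 10**cont positional weights by a single forward Horner pass temp = temp*10 + x over each row's even elements, emitted as a list comprehension.
import Mathlib
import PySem

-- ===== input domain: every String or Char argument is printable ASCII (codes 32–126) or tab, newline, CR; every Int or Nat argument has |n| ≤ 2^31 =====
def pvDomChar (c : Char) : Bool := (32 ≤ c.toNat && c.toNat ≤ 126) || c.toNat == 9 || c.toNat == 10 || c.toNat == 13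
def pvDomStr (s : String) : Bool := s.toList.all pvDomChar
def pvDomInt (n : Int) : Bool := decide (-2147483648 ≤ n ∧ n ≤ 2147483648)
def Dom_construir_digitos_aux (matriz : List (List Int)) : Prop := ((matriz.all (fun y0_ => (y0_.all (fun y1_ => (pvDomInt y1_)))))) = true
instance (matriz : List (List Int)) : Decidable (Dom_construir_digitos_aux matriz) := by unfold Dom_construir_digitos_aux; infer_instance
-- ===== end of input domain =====

-- B replaces A's reverse indexing with 10**cont weights by a forward Horner pass over each row's evens (objective: simpler).

-- ===== PORT A =====
def largo1 (matriz : List Int) : Int := matriz.foldl (fun cont _ => cont + 1) 0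

-- A's inner loop: for j in range(1, largo1(i)+1): if i[-j]%2==0: temp += i[-j]*10**cont; cont += 1
-- cont is a nonnegative loop counter, carried as Nat so 10**cont is a Lean power; i[-j] is always
-- in range (1 ≤ j ≤ len i), so pyGetD's default 0 is never used.
def innerA (row : List Int) : Int × Nat :=
  (PySem.List.pyRange 1 (largo1 row + 1) 1).foldl
    (fun s j =>
      let v := PySem.List.pyGetD row (-j) 0
      if PySem.Int.mod v 2 = 0 then (s.1 + v * 10 ^ s.2, s.2 + 1) else s)
    (0, 0)

def construir_digitos_aux (matriz : List (List Int)) : List Int :=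
  matriz.foldl (fun res i => res ++ [(innerA i).1]) []

-- ===== PORT B =====
def fila_val (fila : List Int) : Int :=
  fila.foldl (fun temp x => if PySem.Int.mod x 2 = 0 then temp * 10 + x else temp) 0

def construir_digitos_aux_alt (matriz : List (List Int)) : List Int :=
  matriz.map fila_val

-- ===== PRECONDITION & SPEC =====
def Spec_construir_digitos_aux (matriz : List (List Int)) (out : List Int) : Prop := out = construir_digitos_aux_alt matriz
instance (matriz : List (List Int)) (out : List Int) : Decidable (Spec_construir_digitos_aux matriz out) := by unfold Spec_construir_digitos_aux; infer_instance

-- ===== CLAIM (what is proved, stated in full; the proofs are below) =====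
def Claim_equal_construir_digitos_aux : Prop := ∀ (matriz : List (List Int)), Dom_construir_digitos_aux matriz → Spec_construir_digitos_aux matriz (construir_digitos_aux matriz)

-- ===== LEMMAS AND PROOFS =====

theorem foldl_count (l : List Int) (c : Int) :
    l.foldl (fun c _ => c + 1) c = c + l.length := by
  induction l generalizing c with
  | nil => simp
  | cons x xs ih => simp [ih]; omega

theorem largo1_eq (l : List Int) : largo1 l = (l.length : Int) := by
  unfold largo1; rw [foldl_count]; simp

/-- A's step function, on the element value. -/
def stepA (s : Int × Nat) (v : Int) : Int × Nat :=
  if PySem.Int.mod v 2 = 0 then (s.1 + v * 10 ^ s.2, s.2 + 1) else s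

/-- A's range-of-negative-indices loop is a fold over the reversed row. -/
theorem foldl_negidx (row : List Int) (init : Int × Nat) :
    (PySem.List.pyRange 1 ((row.length : Int) + 1) 1).foldl
      (fun s j => stepA s (PySem.List.pyGetD row (-j) 0)) init
    = row.reverse.foldl stepA init := by
  induction row generalizing init with
  | nil => simp [PySem.List.pyRange_one_eq_nil]
  | cons x xs ih =>
    have hsplit : PySem.List.pyRange 1 ((List.length (x :: xs) : Int) + 1) 1
        = PySem.List.pyRange 1 ((xs.length : Int) + 1) 1 ++ [(xs.length : Int) + 1] := by
      have := PySem.List.pyRange_one_succ_right (a := 1) (b := (xs.length : Int) + 1) (by omega)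
      simpa [List.length_cons] using this
    have hlast : PySem.List.pyGetD (x :: xs) (-((xs.length : Int) + 1)) 0 = x := by
      have h := PySem.List.pyGetD_neg_natCast (xs := x :: xs) (k := xs.length + 1) (d := 0)
        (Nat.succ_pos _) (by simp)
      have hc : ((xs.length + 1 : Nat) : Int) = (xs.length : Int) + 1 := by push_cast; ring
      rw [hc] at h
      simpa using h
    have hcongr : (PySem.List.pyRange 1 ((xs.length : Int) + 1) 1).foldl
        (fun s j => stepA s (PySem.List.pyGetD (x :: xs) (-j) 0)) init
        = (PySem.List.pyRange 1 ((xs.length : Int) + 1) 1).foldl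
        (fun s j => stepA s (PySem.List.pyGetD xs (-j) 0)) init := by
      apply PySem.List.foldl_congr_mem
      intro s j hj
      have hmem := (PySem.List.mem_pyRange_one (a := 1) (b := (xs.length : Int) + 1) (x := j)).1 hj
      have h1 : PySem.List.pyGetD (x :: xs) (-j) 0
          = (x :: xs)[(x :: xs).length - j.toNat]'(by simp; omega) := by
        have := PySem.List.pyGetD_neg_natCast (xs := x :: xs) (k := j.toNat) (d := 0)
          (by omega) (by simp; omega)
        simpa [Int.toNat_of_nonneg (by omega : (0:Int) ≤ j)] using this
      have h2 : PySem.List.pyGetD xs (-j) 0 = xs[xs.length - j.toNat]'(by omega) := by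
        have := PySem.List.pyGetD_neg_natCast (xs := xs) (k := j.toNat) (d := 0)
          (by omega) (by omega)
        simpa [Int.toNat_of_nonneg (by omega : (0:Int) ≤ j)] using this
      have hk : (x :: xs).length - j.toNat = (xs.length - j.toNat) + 1 := by
        simp only [List.length_cons]; omega
      rw [h1, h2]
      congr 1
      simp only [hk, List.getElem_cons_succ]
    rw [hsplit, List.foldl_append, hcongr, ih init]
    simp only [List.foldl_cons, List.foldl_nil, List.reverse_cons, List.foldl_append]
    rw [hlast]

/-- B's Horner fold relates to A's foldr accumulator. -/
theorem horner_eq (l : List Int) (a : Int) :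
    l.foldl (fun temp x => if PySem.Int.mod x 2 = 0 then temp * 10 + x else temp) a
    = a * 10 ^ (l.foldr (fun x s => stepA s x) (0, 0)).2
      + (l.foldr (fun x s => stepA s x) (0, 0)).1 := by
  induction l generalizing a with
  | nil => simp
  | cons x xs ih =>
    simp only [List.foldl_cons, List.foldr_cons]
    by_cases h : PySem.Int.mod x 2 = 0
    · rw [if_pos h, ih]
      show _ = a * 10 ^ (stepA (xs.foldr (fun x s => stepA s x) (0, 0)) x).2
        + (stepA (xs.foldr (fun x s => stepA s x) (0, 0)) x).1
      rw [stepA, if_pos h]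
      simp only
      rw [pow_succ]; ring
    · rw [if_neg h, ih]
      show _ = a * 10 ^ (stepA (xs.foldr (fun x s => stepA s x) (0, 0)) x).2
        + (stepA (xs.foldr (fun x s => stepA s x) (0, 0)) x).1
      rw [stepA, if_neg h]

theorem inner_eq (row : List Int) : (innerA row).1 = fila_val row := by
  unfold innerA fila_val
  rw [largo1_eq]
  show ((PySem.List.pyRange 1 ((row.length : Int) + 1) 1).foldl
      (fun s j => stepA s (PySem.List.pyGetD row (-j) 0)) (0, 0)).1 = _
  rw [foldl_negidx, List.foldl_reverse, horner_eq row 0]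
  simp

-- ===== VERDICT (by name: the statement is the Claim_ definition above) =====
theorem construir_digitos_aux_spec : Claim_equal_construir_digitos_aux := by
  intro matriz _
  unfold Spec_construir_digitos_aux construir_digitos_aux construir_digitos_aux_alt
  rw [PySem.List.foldl_append_singleton_eq_map]
  exact List.map_congr_left (fun i _ => inner_eq i)
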